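-- pv_equiv track=rewrite | github.com/xKimozZ/Gens-AI | parsers/test_parser.py | summarize_elements
-- ===== SOURCE A (Python) =====
-- from typing import Dict, List
--
-- def summarize_elements(elements: List[Dict]) -> str:
--     """Summarize found elements for test generation"""
--     if not elements:
--         return "No interactive elements found"
--
--     summary = []
--     buttons = [e for e in elements if e.get('tag') == 'button']
--     links = [e for e in elements if e.get('tag') == 'a']
--     inputs = [e for e in elements if e.get('tag') == 'input']
--
--     if buttons:
--         summary.append(f"Buttons ({len(buttons)}): " + ", ".join([b.get('text', 'unnamed')[:30] for b in buttons[:5]]))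
--     if links:
--         summary.append(f"Links ({len(links)}): " + ", ".join([l.get('text', 'unnamed')[:30] for l in links[:5]]))
--     if inputs:
--         summary.append(f"Inputs ({len(inputs)}): " + ", ".join([i.get('type', 'text')[:20] for i in inputs[:5]]))
--
--     return "\n".join(summary)
-- ===== SOURCE B (Python) =====
-- def _rank(e):
--     tag = e.get('tag')
--     return 0 if tag == 'button' else (1 if tag == 'a' else 2)
--
--
-- def _format_run(tag, group):
--     if tag == 'input':
--         return f"Inputs ({len(group)}): " + ", ".join(g.get('type', 'text')[:20] for g in group[:5])
--     label = "Buttons" if tag == 'button' else "Links"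
--     return f"{label} ({len(group)}): " + ", ".join(g.get('text', 'unnamed')[:30] for g in group[:5])
--
--
-- def summarize_elements(elements):
--     """Summarize found elements for test generation"""
--     if not elements:
--         return "No interactive elements found"
--     relevant = [e for e in elements if e.get('tag') in ('button', 'a', 'input')]
--     ordered = sorted(relevant, key=_rank)
--     lines = []
--     rest = ordered
--     while rest:
--         tag = rest[0].get('tag')
--         k = 1
--         while k < len(rest) and rest[k].get('tag') == tag:
--             k += 1
--         lines.append(_format_run(tag, rest[:k]))
--         rest = rest[k:]
--     return "\n".join(lines)
-- ===== Notes on version B (the rewrite author's own statement) =====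
-- stated objective: alternative
-- what changed: B replaces A's three independent filter passes and unrolled per-category formatting blocks by a sort-then-scan algorithm: it filters the relevant elements once, stably sorts them by a category rank (button<a<input), and then a single run-detecting scan over the sorted list emits one formatted line per contiguous tag run; stability of the sort preserves A's per-category order.
import Mathlib
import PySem

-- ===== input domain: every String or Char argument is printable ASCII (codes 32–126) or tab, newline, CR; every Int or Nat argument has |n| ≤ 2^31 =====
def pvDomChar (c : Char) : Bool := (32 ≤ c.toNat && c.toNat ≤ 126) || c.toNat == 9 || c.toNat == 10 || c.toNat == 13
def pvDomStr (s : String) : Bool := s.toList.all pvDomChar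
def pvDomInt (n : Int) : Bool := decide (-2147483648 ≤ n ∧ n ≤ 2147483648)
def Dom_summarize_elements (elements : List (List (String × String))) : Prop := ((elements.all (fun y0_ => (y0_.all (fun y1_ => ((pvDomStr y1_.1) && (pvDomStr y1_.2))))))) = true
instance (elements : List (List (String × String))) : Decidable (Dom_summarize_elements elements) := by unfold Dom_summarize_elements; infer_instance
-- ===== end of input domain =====

-- B replaces A's three filter passes by filter-once + stable sort by category rank + one run-detecting scan (objective: alternative algorithm, same observable result).

-- shared primitive: Python dict .get(k, d) — first-match lookup on the association list
def pvGetD (e : List (String × String)) (k d : String) : String :=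
  ((PySem.Dict.mk e).get? k).getD d

-- e.get('tag') (no default: None when absent)
def pvTag (e : List (String × String)) : Option String :=
  (PySem.Dict.mk e).get? "tag"

-- ===== PORT A =====
def summarize_elements (elements : List (List (String × String))) : String :=
  if elements = [] then "No interactive elements found"
  else
    let buttons := elements.filter (fun e => pvTag e == some "button")
    let links := elements.filter (fun e => pvTag e == some "a")
    let inputs := elements.filter (fun e => pvTag e == some "input")
    let summary : List String := []
    let summary := if buttons ≠ [] then
        summary ++ ["Buttons (" ++ PySem.Int.toStr buttons.length ++ "): " ++
          PySem.Str.join ", " ((PySem.List.slice buttons none (some 5)).map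
            (fun b => PySem.Str.slice (pvGetD b "text" "unnamed") none (some 30)))]
      else summary
    let summary := if links ≠ [] then
        summary ++ ["Links (" ++ PySem.Int.toStr links.length ++ "): " ++
          PySem.Str.join ", " ((PySem.List.slice links none (some 5)).map
            (fun l => PySem.Str.slice (pvGetD l "text" "unnamed") none (some 30)))]
      else summary
    let summary := if inputs ≠ [] then
        summary ++ ["Inputs (" ++ PySem.Int.toStr inputs.length ++ "): " ++
          PySem.Str.join ", " ((PySem.List.slice inputs none (some 5)).map
            (fun i => PySem.Str.slice (pvGetD i "type" "text") none (some 20)))]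
      else summary
    PySem.Str.join "\n" summary

-- ===== PORT B =====
-- Source B _rank: sort key 0/1/2 by category
def pvRank (e : List (String × String)) : Int :=
  if pvTag e == some "button" then 0 else if pvTag e == some "a" then 1 else 2

-- Source B _format_run: one line for a run of same-tag elements
def pvFormatRun (tag : Option String) (group : List (List (String × String))) : String :=
  if tag == some "input" then
    "Inputs (" ++ PySem.Int.toStr group.length ++ "): " ++
      PySem.Str.join ", " ((PySem.List.slice group none (some 5)).map
        (fun g => PySem.Str.slice (pvGetD g "type" "text") none (some 20)))
  else
    (if tag == some "button" then "Buttons" else "Links") ++ " (" ++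
      PySem.Int.toStr group.length ++ "): " ++
      PySem.Str.join ", " ((PySem.List.slice group none (some 5)).map
        (fun g => PySem.Str.slice (pvGetD g "text" "unnamed") none (some 30)))

-- Source B's outer while loop over `rest`: the inner while advances k over the maximal
-- same-tag prefix, so rest[:k] is the takeWhile prefix and rest[k:] the dropWhile rest.
def pvRuns : List (List (String × String)) → List String
  | [] => []
  | x :: xs =>
    pvFormatRun (pvTag x) (x :: xs.takeWhile (fun y => pvTag y == pvTag x)) ::
      pvRuns (xs.dropWhile (fun y => pvTag y == pvTag x))
termination_by l => l.length
decreasing_by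
  simp only [List.length_cons]
  exact Nat.lt_succ_of_le (xs.length_dropWhile_le _)

def summarize_elements_alt (elements : List (List (String × String))) : String :=
  if elements = [] then "No interactive elements found"
  else
    let relevant := elements.filter
      (fun e => pvTag e == some "button" || pvTag e == some "a" || pvTag e == some "input")
    let ordered := PySem.List.sorted relevant pvRank
    PySem.Str.join "\n" (pvRuns ordered)

-- ===== PRECONDITION & SPEC =====
def Spec_summarize_elements (elements : List (List (String × String))) (out : String) : Prop := out = summarize_elements_alt elements
instance (elements : List (List (String × String))) (out : String) : Decidable (Spec_summarize_elements elements out) := by unfold Spec_summarize_elements; infer_instance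

-- ===== CLAIM (what is proved, stated in full; the proofs are below) =====
def Claim_equal_summarize_elements : Prop := ∀ (elements : List (List (String × String))), Dom_summarize_elements elements → Spec_summarize_elements elements (summarize_elements elements)

-- ===== LEMMAS AND PROOFS =====

-- insertBy walks past a prefix it does not insert into
theorem pv_insertBy_skip {α : Type} (before : α → α → Bool) (x : α) (bs rest : List α)
    (h : ∀ y ∈ bs, before x y = false) :
    PySem.List.insertBy before x (bs ++ rest) = bs ++ PySem.List.insertBy before x rest := by
  induction bs with
  | nil => simp
  | cons b bs ih =>
    have hb : before x b = false := h b (by simp)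
    simp [PySem.List.insertBy, hb, ih (fun y hy => h y (by simp [hy]))]

-- insertBy puts x in front when every element compares after it
theorem pv_insertBy_front {α : Type} (before : α → α → Bool) (x : α) (ys : List α)
    (h : ∀ y ∈ ys, before x y = true) :
    PySem.List.insertBy before x ys = x :: ys := by
  cases ys with
  | nil => simp [PySem.List.insertBy]
  | cons y ys => simp [PySem.List.insertBy, h y (by simp)]

-- the insertion-sort fold by rank maintains the three ordered blocks
theorem pv_sort3 (xs bs ls is : List (List (String × String)))
    (hb : ∀ y ∈ bs, pvRank y = 0) (hl : ∀ y ∈ ls, pvRank y = 1) (hi : ∀ y ∈ is, pvRank y = 2) :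
    xs.foldl (fun acc x => PySem.List.insertBy (fun a b => decide (pvRank a < pvRank b)) x acc)
        (bs ++ (ls ++ is)) =
      (bs ++ xs.filter (fun e => pvRank e == 0)) ++
        ((ls ++ xs.filter (fun e => pvRank e == 1)) ++ (is ++ xs.filter (fun e => pvRank e == 2))) := by
  induction xs generalizing bs ls is with
  | nil => simp
  | cons x xs ih =>
    have hr : pvRank x = 0 ∨ pvRank x = 1 ∨ pvRank x = 2 := by
      unfold pvRank; split_ifs <;> simp
    simp only [List.foldl_cons, List.filter_cons]
    rcases hr with hr | hr | hr
    · rw [pv_insertBy_skip _ _ bs (ls ++ is)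
          (fun y hy => by simp [hr, hb y hy]),
        pv_insertBy_front _ _ (ls ++ is)
          (fun y hy => by
            rcases List.mem_append.1 hy with h' | h'
            · simp [hr, hl y h']
            · simp [hr, hi y h'])]
      have h9 := ih (bs ++ [x]) ls is
        (fun y hy => by rcases List.mem_append.1 hy with h' | h' <;> simp_all)
        hl hi
      simp only [List.append_assoc, List.singleton_append] at h9
      rw [h9]
      simp [hr]
    · rw [pv_insertBy_skip _ _ bs (ls ++ is)
          (fun y hy => by simp [hr, hb y hy]),
        pv_insertBy_skip _ _ ls is
          (fun y hy => by simp [hr, hl y hy]),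
        pv_insertBy_front _ _ is
          (fun y hy => by simp [hr, hi y hy])]
      have h9 := ih bs (ls ++ [x]) is hb
        (fun y hy => by rcases List.mem_append.1 hy with h' | h' <;> simp_all) hi
      simp only [List.append_assoc, List.singleton_append] at h9
      rw [h9]
      simp [hr]
    · rw [PySem.List.insertBy_of_forall_not_before _ _ _
          (fun y hy => by
            rcases List.mem_append.1 hy with h' | h'
            · simp [hr, hb y h']
            · rcases List.mem_append.1 h' with h'' | h''
              · simp [hr, hl y h'']
              · simp [hr, hi y h''])]
      have h9 := ih bs ls (is ++ [x]) hb hl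
        (fun y hy => by rcases List.mem_append.1 hy with h' | h' <;> simp_all)
      simp only [List.append_assoc, List.singleton_append] at h9
      rw [show (bs ++ (ls ++ is)) ++ [x] = bs ++ (ls ++ (is ++ [x])) by simp, h9]
      simp [hr]

-- pointwise: rank-filters are tag-filters
theorem pv_rank0_iff (e : List (String × String)) :
    (pvRank e == 0) = (pvTag e == some "button") := by
  unfold pvRank; split_ifs with h1 h2 <;> simp_all
theorem pv_rank1_iff (e : List (String × String)) :
    (pvRank e == 1) = (pvTag e == some "a") := by
  unfold pvRank; split_ifs with h1 h2 <;> simp_all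
theorem pv_rank2_iff (e : List (String × String)) :
    (pvRank e == 2) = (!(pvTag e == some "button") && !(pvTag e == some "a")) := by
  unfold pvRank; split_ifs with h1 h2 <;> simp_all

-- the stable sort of the relevant elements is the three tag groups in order
theorem pv_sorted_groups (elements : List (List (String × String))) :
    PySem.List.sorted
        (elements.filter
          (fun e => pvTag e == some "button" || pvTag e == some "a" || pvTag e == some "input"))
        pvRank =
      elements.filter (fun e => pvTag e == some "button") ++
        (elements.filter (fun e => pvTag e == some "a") ++
          elements.filter (fun e => pvTag e == some "input")) := by
  rw [PySem.List.sorted_eq_foldl_insertBy]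
  have h := pv_sort3
    (elements.filter
      (fun e => pvTag e == some "button" || pvTag e == some "a" || pvTag e == some "input"))
    [] [] [] (by simp) (by simp) (by simp)
  simp only [List.nil_append, List.append_nil] at h
  rw [h, List.filter_filter, List.filter_filter, List.filter_filter]
  congr 1
  · exact List.filter_congr (fun e _ => by rw [pv_rank0_iff]; cases h : (pvTag e == some "button") <;> simp)
  congr 1
  · exact List.filter_congr (fun e _ => by
      rw [pv_rank1_iff]
      cases h : (pvTag e == some "a")
      · simp
      · have h2 : pvTag e = some "a" := by simpa using h
        simp [h2])
  · exact List.filter_congr (fun e _ => by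
      rw [pv_rank2_iff]
      cases h : (pvTag e == some "input")
      · simp
      · have h2 : pvTag e = some "input" := by simpa using h
        simp [h2])

-- the run scan peels one maximal constant-tag run
theorem pv_runs_run (t : Option String) (g rest : List (List (String × String)))
    (hg : g ≠ []) (hall : ∀ y ∈ g, pvTag y = t) (hrest : ∀ y ∈ rest, pvTag y ≠ t) :
    pvRuns (g ++ rest) = pvFormatRun t g :: pvRuns rest := by
  obtain ⟨x, gt, rfl⟩ := List.exists_cons_of_ne_nil hg
  have hx : pvTag x = t := hall x (by simp)
  have htwa : (gt ++ rest).takeWhile (fun y => pvTag y == pvTag x) = gt ++ rest.takeWhile (fun y => pvTag y == pvTag x) :=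
    List.takeWhile_append_of_pos (fun y hy => by simp [hx, hall y (by simp [hy])])
  have hdwa : (gt ++ rest).dropWhile (fun y => pvTag y == pvTag x) = rest.dropWhile (fun y => pvTag y == pvTag x) :=
    List.dropWhile_append_of_pos (fun y hy => by simp [hx, hall y (by simp [hy])])
  have htw : rest.takeWhile (fun y => pvTag y == pvTag x) = [] := by
    cases rest with
    | nil => rfl
    | cons r rs =>
      rw [List.takeWhile_cons_of_neg]
      simp [hx, hrest r (by simp)]
  have hdw : rest.dropWhile (fun y => pvTag y == pvTag x) = rest := by
    cases rest with
    | nil => rfl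
    | cons r rs =>
      rw [List.dropWhile_cons_of_neg]
      simp [hx, hrest r (by simp)]
  rw [List.cons_append, pvRuns, htwa, htw, hdwa, hdw, List.append_nil, hx]

-- membership facts for the three filtered groups
theorem pv_mem_filter_tag (elements : List (List (String × String))) (t : String) :
    ∀ y ∈ elements.filter (fun e => pvTag e == some t), pvTag y = some t := by
  intro y hy
  have := (List.mem_filter.1 hy).2
  simpa using this

-- ===== VERDICT (by name: the statement is the Claim_ definition above) =====
theorem summarize_elements_spec : Claim_equal_summarize_elements := by
  intro elements _
  unfold Spec_summarize_elements summarize_elements summarize_elements_alt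
  by_cases h : elements = []
  · simp [h]
  · simp only [h, if_false]
    rw [pv_sorted_groups]
    set B := elements.filter (fun e => pvTag e == some "button") with hB
    set L := elements.filter (fun e => pvTag e == some "a") with hL
    set I := elements.filter (fun e => pvTag e == some "input") with hI
    have hBm : ∀ y ∈ B, pvTag y = some "button" := pv_mem_filter_tag elements "button"
    have hLm : ∀ y ∈ L, pvTag y = some "a" := pv_mem_filter_tag elements "a"
    have hIm : ∀ y ∈ I, pvTag y = some "input" := pv_mem_filter_tag elements "input"
    have hLIne : ∀ y ∈ L ++ I, pvTag y ≠ some "button" := by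
      intro y hy
      rcases List.mem_append.1 hy with h' | h'
      · simp [hLm y h']
      · simp [hIm y h']
    have hIne : ∀ y ∈ I, pvTag y ≠ some "a" := by
      intro y hy; simp [hIm y hy]
    have fmtB : pvFormatRun (some "button") B =
        "Buttons (" ++ PySem.Int.toStr B.length ++ "): " ++
          PySem.Str.join ", " ((PySem.List.slice B none (some 5)).map
            (fun b => PySem.Str.slice (pvGetD b "text" "unnamed") none (some 30))) := by
      simp only [pvFormatRun]
      rw [if_neg (by decide), if_pos (by decide)]
      rw [show ("Buttons" ++ " (" : String) = "Buttons (" from rfl]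
    have fmtL : pvFormatRun (some "a") L =
        "Links (" ++ PySem.Int.toStr L.length ++ "): " ++
          PySem.Str.join ", " ((PySem.List.slice L none (some 5)).map
            (fun l => PySem.Str.slice (pvGetD l "text" "unnamed") none (some 30))) := by
      simp only [pvFormatRun]
      rw [if_neg (by decide), if_neg (by decide)]
      rw [show ("Links" ++ " (" : String) = "Links (" from rfl]
    have fmtI : pvFormatRun (some "input") I =
        "Inputs (" ++ PySem.Int.toStr I.length ++ "): " ++
          PySem.Str.join ", " ((PySem.List.slice I none (some 5)).map
            (fun i => PySem.Str.slice (pvGetD i "type" "text") none (some 20))) := by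
      simp only [pvFormatRun]
      rw [if_pos (by decide)]
    have runsingle : ∀ (t : Option String) (g : List (List (String × String))),
        g ≠ [] → (∀ y ∈ g, pvTag y = t) → pvRuns g = [pvFormatRun t g] := by
      intro t g hg hall
      have := pv_runs_run t g [] hg hall (by simp)
      simpa [pvRuns] using this
    by_cases hb : B = [] <;> by_cases hl : L = [] <;> by_cases hi : I = []
    · simp [hb, hl, hi, pvRuns]
    · simp only [hb, hl, List.nil_append]
      rw [runsingle (some "input") I hi hIm]
      simp [hi, fmtI]
    · simp only [hb, hi, List.nil_append, List.append_nil]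
      rw [runsingle (some "a") L hl hLm]
      simp [hl, fmtL]
    · simp only [hb, List.nil_append]
      rw [pv_runs_run (some "a") L I hl hLm hIne, runsingle (some "input") I hi hIm]
      simp [hl, hi, fmtL, fmtI, PySem.Str.join]
    · simp only [hl, hi, List.append_nil]
      rw [runsingle (some "button") B hb hBm]
      simp [hb, fmtB]
    · simp only [hl, List.nil_append]
      rw [pv_runs_run (some "button") B I hb hBm (by
          intro y hy; simp [hIm y hy]),
        runsingle (some "input") I hi hIm]
      simp [hb, hi, fmtB, fmtI, PySem.Str.join]
    · simp only [hi, List.append_nil]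
      rw [pv_runs_run (some "button") B L hb hBm (by
          intro y hy; simp [hLm y hy]),
        runsingle (some "a") L hl hLm]
      simp [hb, hl, fmtB, fmtL, PySem.Str.join]
    · rw [pv_runs_run (some "button") B (L ++ I) hb hBm hLIne,
        pv_runs_run (some "a") L I hl hLm hIne,
        runsingle (some "input") I hi hIm]
      simp [hb, hl, hi, fmtB, fmtL, fmtI, PySem.Str.join]
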